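-- pv_equiv track=rewrite | github.com/kiki0501/vvv | src/utils/diff_fixer.py | autocorrect_diff
-- ===== SOURCE A (Python) =====
-- def autocorrect_diff(content: str) -> str:
--     """自动修正diff格式错误"""
--     if not content or '<<<<<<< SEARCH' not in content:
--         return content
--
--     lines = content.splitlines()
--     corrected_lines = []
--
--     in_diff_block = False
--     separator_found = False
--
--     for line in lines:
--         stripped_line = line.strip()
--
--         if stripped_line == '<<<<<<< SEARCH':
--             if in_diff_block:
--                 if not separator_found:
--                     corrected_lines.append('=======')
--                 corrected_lines.append('>>>>>>> REPLACE')
--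
--             in_diff_block = True
--             separator_found = False
--             corrected_lines.append(line)
--
--         elif stripped_line == '=======':
--             if in_diff_block:
--                 if not separator_found:
--                     corrected_lines.append(line)
--                     separator_found = True
--             else:
--                 corrected_lines.append(line)
--
--         elif stripped_line == '>>>>>>> REPLACE':
--             if in_diff_block:
--                 if not separator_found:
--                     corrected_lines.append('=======')
--
--                 corrected_lines.append(line)
--                 in_diff_block = False
--                 separator_found = False
--             else:
--                 corrected_lines.append(line)
--         else:
--             corrected_lines.append(line)
--
--     if in_diff_block:
--         if not separator_found:
--             corrected_lines.append('=======')
--         corrected_lines.append('>>>>>>> REPLACE')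
--
--     return '\n'.join(corrected_lines)
-- ===== SOURCE B (Python) =====
-- def _span_until(lines, marker):
--     """Split lines at the first line whose strip() equals marker: (before, from_marker_on)."""
--     for i, l in enumerate(lines):
--         if l.strip() == marker:
--             return lines[:i], lines[i:]
--     return lines, []
--
--
-- def _fix_block(body):
--     """Repair the body of one SEARCH block (body contains no SEARCH line)."""
--     search_part, rest = _span_until(body, '>>>>>>> REPLACE')
--     if rest:
--         close, tail = rest[0], rest[1:]
--     else:
--         close, tail = '>>>>>>> REPLACE', []
--     kept = []
--     seen = False
--     for l in search_part:
--         if l.strip() == '=======':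
--             if not seen:
--                 kept.append(l)
--                 seen = True
--         else:
--             kept.append(l)
--     if not seen:
--         kept.append('=======')
--     return kept + [close] + tail
--
--
-- def autocorrect_diff(content: str) -> str:
--     if not content or '<<<<<<< SEARCH' not in content:
--         return content
--     lines = content.splitlines()
--     out, rest = _span_until(lines, '<<<<<<< SEARCH')
--     out = list(out)
--     while rest:
--         mark = rest[0]
--         body, rest = _span_until(rest[1:], '<<<<<<< SEARCH')
--         out.append(mark)
--         out.extend(_fix_block(body))
--     return '\n'.join(out)
-- ===== Notes on version B (the rewrite author's own statement) =====
-- stated objective: alternative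
-- what changed: Replaces A's single pass with two persistent boolean flags by an upfront partition of the lines into a prefix and SEARCH-delimited blocks, each block repaired independently (split at its first REPLACE line, dedup extra separators, close it), then concatenated.
import Mathlib
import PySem

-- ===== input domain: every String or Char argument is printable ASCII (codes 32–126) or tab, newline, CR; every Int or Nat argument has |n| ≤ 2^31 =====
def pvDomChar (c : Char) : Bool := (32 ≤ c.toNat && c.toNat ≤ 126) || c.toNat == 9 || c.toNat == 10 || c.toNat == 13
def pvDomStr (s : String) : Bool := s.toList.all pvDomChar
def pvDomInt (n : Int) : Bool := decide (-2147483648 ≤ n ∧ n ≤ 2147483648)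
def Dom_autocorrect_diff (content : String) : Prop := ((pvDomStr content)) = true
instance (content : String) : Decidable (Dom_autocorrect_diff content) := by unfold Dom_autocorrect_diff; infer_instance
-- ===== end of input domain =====

-- B replaces A's two-flag state machine by an upfront partition into SEARCH blocks, repairing
-- each block independently (objective: alternative decomposition, same asymptotic cost).

-- ===== PORT A =====
-- one step of A's for-loop; state = (corrected_lines, in_diff_block, separator_found)
def stepA (st : List String × Bool × Bool) (line : String) : List String × Bool × Bool :=
  let stripped := PySem.Str.strip line
  if stripped == "<<<<<<< SEARCH" then
    let acc := if st.2.1 then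
        (if st.2.2 then st.1 else st.1 ++ ["======="]) ++ [">>>>>>> REPLACE"]
      else st.1
    (acc ++ [line], true, false)
  else if stripped == "=======" then
    if st.2.1 then
      if st.2.2 then st else (st.1 ++ [line], st.2.1, true)
    else (st.1 ++ [line], st.2)
  else if stripped == ">>>>>>> REPLACE" then
    if st.2.1 then
      ((if st.2.2 then st.1 else st.1 ++ ["======="]) ++ [line], false, false)
    else (st.1 ++ [line], st.2)
  else (st.1 ++ [line], st.2)

def autocorrect_diff (content : String) : String :=
  if content == "" || !(PySem.Str.isIn "<<<<<<< SEARCH" content) then content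
  else
    PySem.Str.join "\n"
      (if ((PySem.Str.splitlines content).foldl stepA ([], false, false)).2.1 then
        (if ((PySem.Str.splitlines content).foldl stepA ([], false, false)).2.2 then
          ((PySem.Str.splitlines content).foldl stepA ([], false, false)).1
         else ((PySem.Str.splitlines content).foldl stepA ([], false, false)).1 ++ ["======="]) ++
          [">>>>>>> REPLACE"]
       else ((PySem.Str.splitlines content).foldl stepA ([], false, false)).1)

-- ===== PORT B =====
-- port of Source B's _span_until: split at the first line whose strip() equals marker
def spanUntil (marker : String) : List String → List String × List String
  | [] => ([], [])
  | l :: ls =>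
    if PySem.Str.strip l == marker then ([], l :: ls)
    else
      let p := spanUntil marker ls
      (l :: p.1, p.2)

theorem spanUntil_snd_length (marker : String) (ls : List String) :
    (spanUntil marker ls).2.length ≤ ls.length := by
  induction ls with
  | nil => simp [spanUntil]
  | cons l ls ih =>
    simp only [spanUntil]
    split
    · simp
    · simpa using Nat.le_succ_of_le ih

-- one step of Source B's separator-dedup loop in _fix_block; state = (kept, seen)
def stepB (st : List String × Bool) (l : String) : List String × Bool :=
  if PySem.Str.strip l == "=======" then
    if st.2 then st else (st.1 ++ [l], true)
  else (st.1 ++ [l], st.2)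

-- port of Source B's _fix_block
def fixBlock (body : List String) : List String :=
  let p := spanUntil ">>>>>>> REPLACE" body
  let ct : String × List String :=
    match p.2 with
    | [] => (">>>>>>> REPLACE", [])
    | c :: t => (c, t)
  let ks := p.1.foldl stepB ([], false)
  (if ks.2 then ks.1 else ks.1 ++ ["======="]) ++ ct.1 :: ct.2

-- port of Source B's while loop over the remaining blocks
def bLoop : List String → List String
  | [] => []
  | mark :: rest0 =>
    let p := spanUntil "<<<<<<< SEARCH" rest0
    (mark :: fixBlock p.1) ++ bLoop p.2
termination_by ls => ls.length
decreasing_by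
  exact Nat.lt_succ_of_le (spanUntil_snd_length _ _)

def autocorrect_diff_alt (content : String) : String :=
  if content == "" || !(PySem.Str.isIn "<<<<<<< SEARCH" content) then content
  else
    PySem.Str.join "\n"
      ((spanUntil "<<<<<<< SEARCH" (PySem.Str.splitlines content)).1 ++
        bLoop (spanUntil "<<<<<<< SEARCH" (PySem.Str.splitlines content)).2)

-- ===== PRECONDITION & SPEC =====
def Spec_autocorrect_diff (content : String) (out : String) : Prop := out = autocorrect_diff_alt content
instance (content : String) (out : String) : Decidable (Spec_autocorrect_diff content out) := by unfold Spec_autocorrect_diff; infer_instance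

-- ===== CLAIM (what is proved, stated in full; the proofs are below) =====
def Claim_equal_autocorrect_diff : Prop := ∀ (content : String), Dom_autocorrect_diff content → Spec_autocorrect_diff content (autocorrect_diff content)

-- ===== LEMMAS AND PROOFS =====

-- "close tokens" A emits when leaving a block in state (inb, sep)
def closeIf (inb sep : Bool) : List String :=
  if inb then (if sep then [] else ["======="]) ++ [">>>>>>> REPLACE"] else []

theorem spanUntil_eq_append (marker : String) (ls : List String) :
    (spanUntil marker ls).1 ++ (spanUntil marker ls).2 = ls := by
  induction ls with
  | nil => simp [spanUntil]
  | cons l ls ih =>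
    simp only [spanUntil]
    split
    · simp
    · simpa using ih

theorem spanUntil_fst_no_marker (marker : String) (ls : List String) :
    ∀ l ∈ (spanUntil marker ls).1, ¬ (PySem.Str.strip l == marker) = true := by
  induction ls with
  | nil => simp [spanUntil]
  | cons l ls ih =>
    simp only [spanUntil]
    split
    · simp
    · intro x hx
      rcases List.mem_cons.mp hx with h | h
      · subst h; simp_all
      · exact ih x h

theorem spanUntil_snd_head (marker : String) (ls : List String) :
    (spanUntil marker ls).2 = [] ∨
      ∃ c t, (spanUntil marker ls).2 = c :: t ∧ (PySem.Str.strip c == marker) = true := by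
  induction ls with
  | nil => simp [spanUntil]
  | cons l ls ih =>
    simp only [spanUntil]
    split
    · exact Or.inr ⟨l, ls, rfl, by assumption⟩
    · exact ih

-- outside a block, every non-SEARCH line passes through verbatim
theorem foldA_outside (p : List String) (acc : List String)
    (h : ∀ l ∈ p, ¬ (PySem.Str.strip l == "<<<<<<< SEARCH") = true) :
    p.foldl stepA (acc, false, false) = (acc ++ p, false, false) := by
  induction p generalizing acc with
  | nil => simp
  | cons l ls ih =>
    have hl := h l (by simp)
    have : stepA (acc, false, false) l = (acc ++ [l], false, false) := by
      simp only [stepA]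
      split
      · exact absurd (by assumption) hl
      · split <;> split <;> simp_all
    rw [List.foldl_cons, this, ih _ (fun x hx => h x (List.mem_cons_of_mem _ hx))]
    simp

-- B's dedup fold and its one-step shift property
theorem stepB_shift (k : List String) (sep : Bool) (l : String) :
    stepB (k, sep) l = (k ++ (stepB ([], sep) l).1, (stepB ([], sep) l).2) := by
  simp only [stepB]
  by_cases hl : (PySem.Str.strip l == "=======") = true <;> cases sep <;> simp [hl]

theorem foldB_append (s : List String) (k : List String) (sep : Bool) :
    s.foldl stepB (k, sep) = (k ++ (s.foldl stepB ([], sep)).1, (s.foldl stepB ([], sep)).2) := by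
  induction s generalizing k sep with
  | nil => simp
  | cons l ls ih =>
    rw [List.foldl_cons, List.foldl_cons, stepB_shift]
    obtain ⟨a, b, hab⟩ : ∃ a b, stepB ([], sep) l = (a, b) := ⟨_, _, rfl⟩
    rw [hab, ih (k ++ a) b, ih a b]
    simp

-- inside a block, over lines that are neither SEARCH nor REPLACE, A's fold is B's dedup fold
theorem foldA_inblock (s : List String) (acc : List String) (sep : Bool)
    (h : ∀ l ∈ s, ¬ (PySem.Str.strip l == "<<<<<<< SEARCH") = true ∧
                  ¬ (PySem.Str.strip l == ">>>>>>> REPLACE") = true) :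
    s.foldl stepA (acc, true, sep) =
      (acc ++ (s.foldl stepB ([], sep)).1, true, (s.foldl stepB ([], sep)).2) := by
  induction s generalizing acc sep with
  | nil => simp
  | cons l ls ih =>
    obtain ⟨h1, h2⟩ := h l (by simp)
    have ht : ∀ x ∈ ls, ¬ (PySem.Str.strip x == "<<<<<<< SEARCH") = true ∧
                  ¬ (PySem.Str.strip x == ">>>>>>> REPLACE") = true :=
      fun x hx => h x (List.mem_cons_of_mem l hx)
    rw [List.foldl_cons, List.foldl_cons]
    by_cases hl : (PySem.Str.strip l == "=======") = true
    · cases sep with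
      | true =>
        have hA : stepA (acc, true, true) l = (acc, true, true) := by simp [stepA, h1, hl]
        have hB : stepB ([], true) l = ([], true) := by simp [stepB, hl]
        rw [hA, hB, ih acc true ht]
      | false =>
        have hA : stepA (acc, true, false) l = (acc ++ [l], true, true) := by
          simp [stepA, h1, hl]
        have hB : stepB ([], false) l = ([l], true) := by simp [stepB, hl]
        rw [hA, hB, ih (acc ++ [l]) true ht, foldB_append ls [l] true]
        simp
    · have hA : stepA (acc, true, sep) l = (acc ++ [l], true, sep) := by
        simp [stepA, h1, h2, hl]
      have hB : stepB ([], sep) l = ([l], sep) := by simp [stepB, hl]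
      rw [hA, hB, ih (acc ++ [l]) sep ht, foldB_append ls [l] sep]
      simp

-- processing one block body (no SEARCH line inside) from the fresh in-block state:
-- the result plus its pending close tokens is exactly acc ++ fixBlock body
theorem foldA_body (body : List String) (acc : List String)
    (h : ∀ l ∈ body, ¬ (PySem.Str.strip l == "<<<<<<< SEARCH") = true) :
    (body.foldl stepA (acc, true, false)).1 ++
        closeIf (body.foldl stepA (acc, true, false)).2.1 (body.foldl stepA (acc, true, false)).2.2
      = acc ++ fixBlock body := by
  obtain ⟨s, rest, h1, h2⟩ : ∃ s rest, (spanUntil ">>>>>>> REPLACE" body).1 = s ∧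
      (spanUntil ">>>>>>> REPLACE" body).2 = rest := ⟨_, _, rfl, rfl⟩
  have hsplit : s ++ rest = body := by rw [← h1, ← h2]; exact spanUntil_eq_append _ _
  have hs := spanUntil_fst_no_marker ">>>>>>> REPLACE" body
  rw [h1] at hs
  have hns : ∀ l ∈ s, ¬ (PySem.Str.strip l == "<<<<<<< SEARCH") = true ∧
      ¬ (PySem.Str.strip l == ">>>>>>> REPLACE") = true :=
    fun l hls => ⟨h l (hsplit ▸ List.mem_append_left _ hls), hs l hls⟩
  have hrest := spanUntil_snd_head ">>>>>>> REPLACE" body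
  rw [h2] at hrest
  conv_lhs => rw [← hsplit]
  rcases hrest with rfl | ⟨c, t, rfl, hc⟩
  · rw [List.append_nil, foldA_inblock s acc false hns]
    simp only [fixBlock, h1, h2, closeIf]
    cases (s.foldl stepB ([], false)).2 <;> simp
  · have hceq : PySem.Str.strip c = ">>>>>>> REPLACE" := by
      have := hc; exact eq_of_beq hc
    have hnt : ∀ l ∈ t, ¬ (PySem.Str.strip l == "<<<<<<< SEARCH") = true :=
      fun l hlt => h l (hsplit ▸ List.mem_append_right _ (List.mem_cons_of_mem c hlt))
    rw [List.foldl_append, foldA_inblock s acc false hns, List.foldl_cons]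
    have hstep : stepA (acc ++ (s.foldl stepB ([], false)).1, true, (s.foldl stepB ([], false)).2) c
        = ((if (s.foldl stepB ([], false)).2 then acc ++ (s.foldl stepB ([], false)).1
            else acc ++ (s.foldl stepB ([], false)).1 ++ ["======="]) ++ [c], false, false) := by
      simp [stepA, hceq]
    rw [hstep]
    have : (if (s.foldl stepB ([], false)).2 then acc ++ (s.foldl stepB ([], false)).1
            else acc ++ (s.foldl stepB ([], false)).1 ++ ["======="]) ++ [c] ++ t
        = ((if (s.foldl stepB ([], false)).2 then acc ++ (s.foldl stepB ([], false)).1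
            else acc ++ (s.foldl stepB ([], false)).1 ++ ["======="]) ++ [c] ++ t) := rfl
    rw [foldA_outside t _ hnt]
    simp only [fixBlock, h1, h2, closeIf]
    cases (s.foldl stepB ([], false)).2 <;> simp

-- main induction over the blocks: finishing A's fold over rest equals acc + pending close + bLoop rest
theorem foldA_blocks (n : Nat) : ∀ (rest : List String), rest.length ≤ n →
    (rest = [] ∨ ∃ m r0, rest = m :: r0 ∧ (PySem.Str.strip m == "<<<<<<< SEARCH") = true) →
    ∀ (acc : List String) (inb sep : Bool),
    (rest.foldl stepA (acc, inb, sep)).1 ++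
        closeIf (rest.foldl stepA (acc, inb, sep)).2.1 (rest.foldl stepA (acc, inb, sep)).2.2
      = acc ++ closeIf inb sep ++ bLoop rest := by
  induction n with
  | zero =>
    intro rest hlen hwf acc inb sep
    have : rest = [] := List.length_eq_zero_iff.mp (Nat.le_zero.mp hlen)
    subst this; simp [bLoop]
  | succ n ih =>
    intro rest hlen hwf acc inb sep
    rcases hwf with rfl | ⟨m, r0, rfl, hm⟩
    · simp [bLoop]
    · have hmeq : PySem.Str.strip m = "<<<<<<< SEARCH" := eq_of_beq hm
      have hstep : stepA (acc, inb, sep) m = (acc ++ closeIf inb sep ++ [m], true, false) := by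
        simp only [stepA, hmeq, closeIf]
        cases inb <;> cases sep <;> simp
      obtain ⟨body, rest', hb1, hb2⟩ : ∃ b r, (spanUntil "<<<<<<< SEARCH" r0).1 = b ∧
          (spanUntil "<<<<<<< SEARCH" r0).2 = r := ⟨_, _, rfl, rfl⟩
      have hr0 : body ++ rest' = r0 := by rw [← hb1, ← hb2]; exact spanUntil_eq_append _ _
      have hbody := spanUntil_fst_no_marker "<<<<<<< SEARCH" r0
      rw [hb1] at hbody
      have hwf' : rest' = [] ∨ ∃ m' r0', rest' = m' :: r0' ∧
          (PySem.Str.strip m' == "<<<<<<< SEARCH") = true := by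
        have := spanUntil_snd_head "<<<<<<< SEARCH" r0
        rw [hb2] at this
        rcases this with h' | ⟨c, t, h', hc⟩
        · exact Or.inl h'
        · exact Or.inr ⟨c, t, h', hc⟩
      have hlen' : rest'.length ≤ n := by
        have hl1 : rest'.length ≤ r0.length := by rw [← hb2]; exact spanUntil_snd_length _ _
        have hl2 : r0.length + 1 ≤ n + 1 := by simpa using hlen
        omega
      rw [List.foldl_cons, hstep]
      conv_lhs => rw [← hr0]
      rw [List.foldl_append]
      obtain ⟨X, i, s, hX⟩ : ∃ X i s,
          body.foldl stepA (acc ++ closeIf inb sep ++ [m], true, false) = (X, i, s) :=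
        ⟨_, _, _, rfl⟩
      rw [hX, ih rest' hlen' hwf' X i s]
      have hX2 := foldA_body body (acc ++ closeIf inb sep ++ [m]) hbody
      rw [hX] at hX2
      simp only at hX2
      rw [hX2]
      conv_rhs => rw [bLoop]
      simp [hb1, hb2]

-- ===== VERDICT (by name: the statement is the Claim_ definition above) =====
theorem autocorrect_diff_spec : Claim_equal_autocorrect_diff := by
  intro content _
  unfold Spec_autocorrect_diff autocorrect_diff autocorrect_diff_alt
  split
  · rfl
  · congr 1
    generalize PySem.Str.splitlines content = lines
    obtain ⟨pre, rest, h1, h2⟩ : ∃ a b, (spanUntil "<<<<<<< SEARCH" lines).1 = a ∧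
        (spanUntil "<<<<<<< SEARCH" lines).2 = b := ⟨_, _, rfl, rfl⟩
    have hsplit : pre ++ rest = lines := by rw [← h1, ← h2]; exact spanUntil_eq_append _ _
    have hpre := spanUntil_fst_no_marker "<<<<<<< SEARCH" lines
    rw [h1] at hpre
    have hwf : rest = [] ∨ ∃ m r0, rest = m :: r0 ∧
        (PySem.Str.strip m == "<<<<<<< SEARCH") = true := by
      have := spanUntil_snd_head "<<<<<<< SEARCH" lines
      rw [h2] at this
      rcases this with h' | ⟨c, t, h', hc⟩
      · exact Or.inl h'
      · exact Or.inr ⟨c, t, h', hc⟩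
    have habs : ∀ (a : List String) (i s : Bool),
        (if i then (if s then a else a ++ ["======="]) ++ [">>>>>>> REPLACE"] else a)
          = a ++ closeIf i s := by
      intro a i s
      simp only [closeIf]
      cases i <;> cases s <;> simp
    conv_lhs => rw [← hsplit, List.foldl_append, foldA_outside pre [] hpre]
    rw [h1, h2, habs, foldA_blocks rest.length rest le_rfl hwf ([] ++ pre) false false]
    simp [closeIf]
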